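-- pv_equiv track=rewrite | github.com/XJBTech/SanBot | src/pySanbot/util/byte_bit_util.py | generate_byte
-- ===== SOURCE A (Python) =====
-- def generate_byte(bools):
--     """Generate a byte based on a list of bools
--
--     :bools: a list of bools from which to generate the byte
--     :returns: a byte representing the bools
--
--     """
--     bools_len = len(bools)
--     if bools_len > 8:
--         # we should never encounter this, wrong length
--         raise ValueError
--     rtn = 0  # initialize the bool we are returning
--     for i in range(bools_len):
--         rtn += ((1 if bools[bools_len - i - 1] else 0) << i)
--     return rtn
-- ===== SOURCE B (Python) =====
-- def generate_byte(bools):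
--     """Generate a byte based on a list of bools (Horner-style accumulation)."""
--     if len(bools) > 8:
--         raise ValueError
--     rtn = 0
--     for b in bools:
--         rtn = rtn * 2 + (1 if b else 0)
--     return rtn
-- ===== Notes on version B (the rewrite author's own statement) =====
-- stated objective: idiomatic
-- what changed: Replaced the reverse-indexed shift-and-add loop (bools[len-i-1] << i over range(len)) with a forward Horner accumulation rtn = rtn*2 + bit directly over the elements, dropping all index arithmetic and shifts.
import Mathlib
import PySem

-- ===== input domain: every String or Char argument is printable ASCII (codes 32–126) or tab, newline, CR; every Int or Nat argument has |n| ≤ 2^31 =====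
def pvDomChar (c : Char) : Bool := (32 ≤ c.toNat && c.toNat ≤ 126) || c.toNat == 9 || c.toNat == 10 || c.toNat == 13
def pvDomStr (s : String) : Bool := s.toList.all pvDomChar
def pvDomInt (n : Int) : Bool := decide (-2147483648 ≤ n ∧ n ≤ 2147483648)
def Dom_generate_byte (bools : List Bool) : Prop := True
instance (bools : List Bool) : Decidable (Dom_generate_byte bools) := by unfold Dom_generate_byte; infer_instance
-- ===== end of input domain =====

-- B replaces A's reverse-indexed shift-and-add loop with a forward Horner accumulation (idiomatic; same cost).

-- ===== PORT A =====
-- the indexing bools[bools_len - i - 1] is always in range (0 ≤ i < bools_len), so pyGetD's default is never used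
def generate_byte (bools : List Bool) : Int :=
  (PySem.List.pyRange 0 (bools.length : Int) 1).foldl
    (fun rtn i =>
      rtn + (if PySem.List.pyGetD bools ((bools.length : Int) - i - 1) false then (1 : Int) else 0) <<< i.toNat)
    0

-- ===== PORT B =====
def generate_byte_alt (bools : List Bool) : Int :=
  bools.foldl (fun rtn b => rtn * 2 + (if b then 1 else 0)) 0

-- ===== PRECONDITION & SPEC =====
-- A raises ValueError when len(bools) > 8; exactly those inputs are excluded.
def Pre_generate_byte (bools : List Bool) : Prop := bools.length ≤ 8
instance (bools : List Bool) : Decidable (Pre_generate_byte bools) := by unfold Pre_generate_byte; infer_instance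
def pvWitness_generate_byte : List Bool := [true, false, true]

def Spec_generate_byte (bools : List Bool) (out : Int) : Prop := out = generate_byte_alt bools
instance (bools : List Bool) (out : Int) : Decidable (Spec_generate_byte bools out) := by unfold Spec_generate_byte; infer_instance

-- ===== CLAIM (what is proved, stated in full; the proofs are below) =====
def Claim_equal_generate_byte : Prop := ∀ (bools : List Bool), Dom_generate_byte bools → Pre_generate_byte bools → Spec_generate_byte bools (generate_byte bools)

-- ===== LEMMAS AND PROOFS =====

-- reference value: most-significant bit first
def pvAux : List Bool → Int
  | [] => 0
  | b :: l => (if b then 2 ^ l.length else 0) + pvAux l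

theorem pvAlt_acc (l : List Bool) (acc : Int) :
    l.foldl (fun rtn b => rtn * 2 + (if b then 1 else 0)) acc
      = acc * 2 ^ l.length + pvAux l := by
  induction l generalizing acc with
  | nil => simp [pvAux]
  | cons b l ih =>
    simp only [List.foldl_cons, ih, pvAux, List.length_cons]
    split <;> ring

theorem pvA_eq_aux (l : List Bool) : generate_byte l = pvAux l := by
  unfold generate_byte
  rw [PySem.List.pyRange_one, List.foldl_map, PySem.List.foldl_add]
  simp only [zero_add, Int.toNat_natCast, Int.sub_zero]
  induction l with
  | nil => simp [pvAux]
  | cons b l ih =>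
    simp only [List.length_cons, pvAux]
    push_cast
    rw [List.range_succ, List.map_append, List.sum_append]
    have hlast : PySem.List.pyGetD (b :: l) ((l.length : Int) + 1 - (l.length : Int) - 1) false = b := by
      have : ((l.length : Int) + 1 - (l.length : Int) - 1) = 0 := by ring
      rw [this, PySem.List.pyGetD_zero_cons]
    have hrest : (List.range l.length).map
          (fun (k : Nat) => (if PySem.List.pyGetD (b :: l) ((l.length : Int) + 1 - (k : Int) - 1) false then (1 : Int) else 0) <<< k)
        = (List.range l.length).map
          (fun (k : Nat) => (if PySem.List.pyGetD l ((l.length : Int) - (k : Int) - 1) false then (1 : Int) else 0) <<< k) := by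
      apply List.map_congr_left
      intro k hk
      rw [List.mem_range] at hk
      have h1 : ((l.length : Int) + 1 - (k : Int) - 1) = ((l.length - k : Nat) : Int) := by omega
      have h2 : ((l.length : Int) - (k : Int) - 1) = ((l.length - k - 1 : Nat) : Int) := by omega
      rw [h1, h2, PySem.List.pyGetD_natCast, PySem.List.pyGetD_natCast]
      have h3 : l.length - k = (l.length - k - 1) + 1 := by omega
      rw [h3, List.getD_cons_succ]
      simp
    rw [hrest, ih]
    simp only [List.map_cons, List.map_nil, List.sum_cons, List.sum_nil, hlast]
    have hshift : ∀ (b : Bool) (n : Nat), (if b then (1 : Int) else 0) <<< n = (if b then 2 ^ n else 0) := by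
      intro b n
      cases b <;> simp [Int.shiftLeft_eq]
    rw [hshift]
    ring

-- ===== VERDICT (by name: the statement is the Claim_ definition above) =====
theorem generate_byte_spec : Claim_equal_generate_byte := by
  intro bools _ _
  unfold Spec_generate_byte generate_byte_alt
  rw [pvA_eq_aux, pvAlt_acc]
  simp
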